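-- pv_equiv track=rewrite | github.com/Dontaae/CodeDojo-Backend | app.py | get_rank_from_xp
-- ===== SOURCE A (Python) =====
-- def get_rank_from_xp(xp: int) -> str:
--     ranks = [
--         (0, "White Belt"),
--         (20, "Yellow Belt"),
--         (40, "Orange Belt"),
--         (70, "Green Belt"),
--         (100, "Blue Belt"),
--         (140, "Purple Belt"),
--         (190, "Brown Belt"),
--         (250, "Black Belt")
--     ]
--     for threshold, rank in reversed(ranks):
--         if xp >= threshold:
--             return rank
--     return "White Belt"
-- ===== SOURCE B (Python) =====
-- def get_rank_from_xp(xp: int) -> str: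
--     thresholds = [0, 20, 40, 70, 100, 140, 190, 250]
--     names = ["White Belt", "Yellow Belt", "Orange Belt", "Green Belt",
--              "Blue Belt", "Purple Belt", "Brown Belt", "Black Belt"]
--     lo, hi = 0, len(thresholds)
--     while lo < hi:  # binary search: bisect_right(thresholds, xp)
--         mid = (lo + hi) // 2
--         if thresholds[mid] <= xp:
--             lo = mid + 1
--         else:
--             hi = mid
--     return names[max(0, lo - 1)]
-- ===== Notes on version B (the rewrite author's own statement) =====
-- stated objective: alternative
-- what changed: Replaced the reversed linear scan of (threshold, rank) pairs with a hand-written binary search (bisect_right) over a sorted threshold list indexing a parallel name list, with the index clamped to 0 for negative xp.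
import Mathlib
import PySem

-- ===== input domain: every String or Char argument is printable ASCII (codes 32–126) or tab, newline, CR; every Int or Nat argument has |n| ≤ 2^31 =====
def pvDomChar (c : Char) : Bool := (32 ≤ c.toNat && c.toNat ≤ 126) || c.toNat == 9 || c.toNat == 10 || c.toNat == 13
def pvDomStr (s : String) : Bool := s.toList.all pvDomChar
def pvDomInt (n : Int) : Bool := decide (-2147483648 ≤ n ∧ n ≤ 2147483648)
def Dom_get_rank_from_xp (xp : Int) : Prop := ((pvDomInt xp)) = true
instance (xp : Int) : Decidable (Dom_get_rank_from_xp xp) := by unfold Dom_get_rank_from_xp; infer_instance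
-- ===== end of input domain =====

-- B replaces A's reversed linear scan with a binary search (bisect_right) into a sorted
-- threshold table plus a parallel name list; alternative structure, same exact values.

-- ===== PORT A =====
-- the reversed-loop: first (threshold, rank) with xp ≥ threshold wins, default "White Belt"
def rankLoop (xp : Int) : List (Int × String) → String
  | [] => "White Belt"
  | (t, r) :: rest => if t ≤ xp then r else rankLoop xp rest

def get_rank_from_xp (xp : Int) : String :=
  let ranks : List (Int × String) :=
    [(0, "White Belt"), (20, "Yellow Belt"), (40, "Orange Belt"), (70, "Green Belt"),
     (100, "Blue Belt"), (140, "Purple Belt"), (190, "Brown Belt"), (250, "Black Belt")]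
  rankLoop xp ranks.reverse

-- ===== PORT B =====
-- the while-loop of Source B: binary search (bisect_right) on [lo, hi)
def bsr (xp : Int) (ts : List Int) (lo hi : Nat) : Nat :=
  if h : lo < hi then
    let mid := (lo + hi) / 2
    if ts.getD mid 0 ≤ xp then bsr xp ts (mid + 1) hi else bsr xp ts lo mid
  else lo
termination_by hi - lo
decreasing_by all_goals omega

def get_rank_from_xp_alt (xp : Int) : String :=
  let thresholds : List Int := [0, 20, 40, 70, 100, 140, 190, 250]
  let names : List String :=
    ["White Belt", "Yellow Belt", "Orange Belt", "Green Belt",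
     "Blue Belt", "Purple Belt", "Brown Belt", "Black Belt"]
  let lo := bsr xp thresholds 0 thresholds.length
  names.getD (max 0 (lo - 1)) ""   -- index is always in range, so plain indexing

-- ===== PRECONDITION & SPEC =====
def Spec_get_rank_from_xp (xp : Int) (out : String) : Prop := out = get_rank_from_xp_alt xp
instance (xp : Int) (out : String) : Decidable (Spec_get_rank_from_xp xp out) := by unfold Spec_get_rank_from_xp; infer_instance

-- ===== CLAIM (what is proved, stated in full; the proofs are below) =====
def Claim_equal_get_rank_from_xp : Prop := ∀ (xp : Int), Dom_get_rank_from_xp xp → Spec_get_rank_from_xp xp (get_rank_from_xp xp)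

-- ===== LEMMAS AND PROOFS =====
lemma bsr_step (xp : Int) (ts : List Int) (lo hi : Nat) (h : lo < hi) :
    bsr xp ts lo hi =
      if ts.getD ((lo + hi) / 2) 0 ≤ xp then bsr xp ts ((lo + hi) / 2 + 1) hi
      else bsr xp ts lo ((lo + hi) / 2) := by
  rw [bsr]; simp [h]

lemma bsr_done (xp : Int) (ts : List Int) (lo hi : Nat) (h : ¬ lo < hi) :
    bsr xp ts lo hi = lo := by
  rw [bsr]; simp [h]

lemma eqA0 (xp : Int) (h1 : xp < 0) : get_rank_from_xp xp = "White Belt" := by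
  unfold get_rank_from_xp
  simp only [List.reverse, List.reverseAux, rankLoop]
  split_ifs <;> first | rfl | omega

lemma eqB0 (xp : Int) (h1 : xp < 0) : get_rank_from_xp_alt xp = "White Belt" := by
  unfold get_rank_from_xp_alt
  have hb : bsr xp [0, 20, 40, 70, 100, 140, 190, 250] 0 8 = 0 := by
    rw [bsr_step _ _ _ _ (by norm_num)]
    norm_num
    rw [if_neg (by omega)]
    rw [bsr_step _ _ _ _ (by norm_num)]
    norm_num
    rw [if_neg (by omega)]
    rw [bsr_step _ _ _ _ (by norm_num)]
    norm_num
    rw [if_neg (by omega)]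
    rw [bsr_step _ _ _ _ (by norm_num)]
    norm_num
    rw [if_neg (by omega)]
    rw [bsr_done _ _ _ _ (by norm_num)]
  simp [hb]

lemma eqA1 (xp : Int) (h1 : 0 ≤ xp) (h2 : xp < 20) : get_rank_from_xp xp = "White Belt" := by
  unfold get_rank_from_xp
  simp only [List.reverse, List.reverseAux, rankLoop]
  split_ifs <;> first | rfl | omega

lemma eqB1 (xp : Int) (h1 : 0 ≤ xp) (h2 : xp < 20) : get_rank_from_xp_alt xp = "White Belt" := by
  unfold get_rank_from_xp_alt
  have hb : bsr xp [0, 20, 40, 70, 100, 140, 190, 250] 0 8 = 1 := by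
    rw [bsr_step _ _ _ _ (by norm_num)]
    norm_num
    rw [if_neg (by omega)]
    rw [bsr_step _ _ _ _ (by norm_num)]
    norm_num
    rw [if_neg (by omega)]
    rw [bsr_step _ _ _ _ (by norm_num)]
    norm_num
    rw [if_neg (by omega)]
    rw [bsr_step _ _ _ _ (by norm_num)]
    norm_num
    rw [if_pos (by omega)]
    rw [bsr_done _ _ _ _ (by norm_num)]
  simp [hb]

lemma eqA2 (xp : Int) (h1 : 20 ≤ xp) (h2 : xp < 40) : get_rank_from_xp xp = "Yellow Belt" := by
  unfold get_rank_from_xp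
  simp only [List.reverse, List.reverseAux, rankLoop]
  split_ifs <;> first | rfl | omega

lemma eqB2 (xp : Int) (h1 : 20 ≤ xp) (h2 : xp < 40) : get_rank_from_xp_alt xp = "Yellow Belt" := by
  unfold get_rank_from_xp_alt
  have hb : bsr xp [0, 20, 40, 70, 100, 140, 190, 250] 0 8 = 2 := by
    rw [bsr_step _ _ _ _ (by norm_num)]
    norm_num
    rw [if_neg (by omega)]
    rw [bsr_step _ _ _ _ (by norm_num)]
    norm_num
    rw [if_neg (by omega)]
    rw [bsr_step _ _ _ _ (by norm_num)]
    norm_num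
    rw [if_pos (by omega)]
    rw [bsr_done _ _ _ _ (by norm_num)]
  simp [hb]

lemma eqA3 (xp : Int) (h1 : 40 ≤ xp) (h2 : xp < 70) : get_rank_from_xp xp = "Orange Belt" := by
  unfold get_rank_from_xp
  simp only [List.reverse, List.reverseAux, rankLoop]
  split_ifs <;> first | rfl | omega

lemma eqB3 (xp : Int) (h1 : 40 ≤ xp) (h2 : xp < 70) : get_rank_from_xp_alt xp = "Orange Belt" := by
  unfold get_rank_from_xp_alt
  have hb : bsr xp [0, 20, 40, 70, 100, 140, 190, 250] 0 8 = 3 := by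
    rw [bsr_step _ _ _ _ (by norm_num)]
    norm_num
    rw [if_neg (by omega)]
    rw [bsr_step _ _ _ _ (by norm_num)]
    norm_num
    rw [if_pos (by omega)]
    rw [bsr_step _ _ _ _ (by norm_num)]
    norm_num
    rw [if_neg (by omega)]
    rw [bsr_done _ _ _ _ (by norm_num)]
  simp [hb]

lemma eqA4 (xp : Int) (h1 : 70 ≤ xp) (h2 : xp < 100) : get_rank_from_xp xp = "Green Belt" := by
  unfold get_rank_from_xp
  simp only [List.reverse, List.reverseAux, rankLoop]
  split_ifs <;> first | rfl | omega

lemma eqB4 (xp : Int) (h1 : 70 ≤ xp) (h2 : xp < 100) : get_rank_from_xp_alt xp = "Green Belt" := by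
  unfold get_rank_from_xp_alt
  have hb : bsr xp [0, 20, 40, 70, 100, 140, 190, 250] 0 8 = 4 := by
    rw [bsr_step _ _ _ _ (by norm_num)]
    norm_num
    rw [if_neg (by omega)]
    rw [bsr_step _ _ _ _ (by norm_num)]
    norm_num
    rw [if_pos (by omega)]
    rw [bsr_step _ _ _ _ (by norm_num)]
    norm_num
    rw [if_pos (by omega)]
    rw [bsr_done _ _ _ _ (by norm_num)]
  simp [hb]

lemma eqA5 (xp : Int) (h1 : 100 ≤ xp) (h2 : xp < 140) : get_rank_from_xp xp = "Blue Belt" := by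
  unfold get_rank_from_xp
  simp only [List.reverse, List.reverseAux, rankLoop]
  split_ifs <;> first | rfl | omega

lemma eqB5 (xp : Int) (h1 : 100 ≤ xp) (h2 : xp < 140) : get_rank_from_xp_alt xp = "Blue Belt" := by
  unfold get_rank_from_xp_alt
  have hb : bsr xp [0, 20, 40, 70, 100, 140, 190, 250] 0 8 = 5 := by
    rw [bsr_step _ _ _ _ (by norm_num)]
    norm_num
    rw [if_pos (by omega)]
    rw [bsr_step _ _ _ _ (by norm_num)]
    norm_num
    rw [if_neg (by omega)]
    rw [bsr_step _ _ _ _ (by norm_num)]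
    norm_num
    rw [if_neg (by omega)]
    rw [bsr_done _ _ _ _ (by norm_num)]
  simp [hb]

lemma eqA6 (xp : Int) (h1 : 140 ≤ xp) (h2 : xp < 190) : get_rank_from_xp xp = "Purple Belt" := by
  unfold get_rank_from_xp
  simp only [List.reverse, List.reverseAux, rankLoop]
  split_ifs <;> first | rfl | omega

lemma eqB6 (xp : Int) (h1 : 140 ≤ xp) (h2 : xp < 190) : get_rank_from_xp_alt xp = "Purple Belt" := by
  unfold get_rank_from_xp_alt
  have hb : bsr xp [0, 20, 40, 70, 100, 140, 190, 250] 0 8 = 6 := by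
    rw [bsr_step _ _ _ _ (by norm_num)]
    norm_num
    rw [if_pos (by omega)]
    rw [bsr_step _ _ _ _ (by norm_num)]
    norm_num
    rw [if_neg (by omega)]
    rw [bsr_step _ _ _ _ (by norm_num)]
    norm_num
    rw [if_pos (by omega)]
    rw [bsr_done _ _ _ _ (by norm_num)]
  simp [hb]

lemma eqA7 (xp : Int) (h1 : 190 ≤ xp) (h2 : xp < 250) : get_rank_from_xp xp = "Brown Belt" := by
  unfold get_rank_from_xp
  simp only [List.reverse, List.reverseAux, rankLoop]
  split_ifs <;> first | rfl | omega

lemma eqB7 (xp : Int) (h1 : 190 ≤ xp) (h2 : xp < 250) : get_rank_from_xp_alt xp = "Brown Belt" := by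
  unfold get_rank_from_xp_alt
  have hb : bsr xp [0, 20, 40, 70, 100, 140, 190, 250] 0 8 = 7 := by
    rw [bsr_step _ _ _ _ (by norm_num)]
    norm_num
    rw [if_pos (by omega)]
    rw [bsr_step _ _ _ _ (by norm_num)]
    norm_num
    rw [if_pos (by omega)]
    rw [bsr_step _ _ _ _ (by norm_num)]
    norm_num
    rw [if_neg (by omega)]
    rw [bsr_done _ _ _ _ (by norm_num)]
  simp [hb]

lemma eqA8 (xp : Int) (h1 : 250 ≤ xp) : get_rank_from_xp xp = "Black Belt" := by
  unfold get_rank_from_xp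
  simp only [List.reverse, List.reverseAux, rankLoop]
  split_ifs <;> first | rfl | omega

lemma eqB8 (xp : Int) (h1 : 250 ≤ xp) : get_rank_from_xp_alt xp = "Black Belt" := by
  unfold get_rank_from_xp_alt
  have hb : bsr xp [0, 20, 40, 70, 100, 140, 190, 250] 0 8 = 8 := by
    rw [bsr_step _ _ _ _ (by norm_num)]
    norm_num
    rw [if_pos (by omega)]
    rw [bsr_step _ _ _ _ (by norm_num)]
    norm_num
    rw [if_pos (by omega)]
    rw [bsr_step _ _ _ _ (by norm_num)]
    norm_num
    rw [if_pos (by omega)]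
    rw [bsr_done _ _ _ _ (by norm_num)]
  simp [hb]

-- ===== VERDICT (by name: the statement is the Claim_ definition above) =====
theorem get_rank_from_xp_spec : Claim_equal_get_rank_from_xp := by
  intro xp _
  unfold Spec_get_rank_from_xp
  rcases lt_or_ge xp 0 with h | h
  · rw [eqA0 xp h, eqB0 xp h]
  rcases lt_or_ge xp 20 with h2 | h2
  · rw [eqA1 xp h h2, eqB1 xp h h2]
  rcases lt_or_ge xp 40 with h3 | h3
  · rw [eqA2 xp h2 h3, eqB2 xp h2 h3]
  rcases lt_or_ge xp 70 with h4 | h4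
  · rw [eqA3 xp h3 h4, eqB3 xp h3 h4]
  rcases lt_or_ge xp 100 with h5 | h5
  · rw [eqA4 xp h4 h5, eqB4 xp h4 h5]
  rcases lt_or_ge xp 140 with h6 | h6
  · rw [eqA5 xp h5 h6, eqB5 xp h5 h6]
  rcases lt_or_ge xp 190 with h7 | h7
  · rw [eqA6 xp h6 h7, eqB6 xp h6 h7]
  rcases lt_or_ge xp 250 with h8 | h8
  · rw [eqA7 xp h7 h8, eqB7 xp h7 h8]
  · rw [eqA8 xp h8, eqB8 xp h8]
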